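-- pv_equiv track=rewrite | github.com/ziguieva/D-corateurs-et-it-rateurs | groupement.py | biz_generator
-- ===== SOURCE A (Python) =====
-- from typing import Iterable, Iterator, Tuple
--
-- def biz_generator(iterable: Iterable) -> Iterator[int]:
--     """
--     Retourne uniquement les entiers entre 1 et 10, selon les règles suivantes :
--     - L'itérable en entrée doit avoir au moins 3 éléments.
--     - Ignorer le premier élément.
--     - Retourner un multiple de 3 seulement s'il est précédé par un nombre pair.
--     - Retourner un multiple de 4 seulement s'il est suivi par un nombre impair.
--     """
--     it = iter(iterable)
--     buffer = []
--
--     # Vérifier qu'il y a au moins 3 éléments et ignorer le premier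
--     try:
--         next(it)  # Ignore le premier élément
--         buffer = [next(it), next(it)]
--     except StopIteration:
--         return  # Fin si moins de 3 éléments
--
--     # Parcours de l'itérable
--     for current in it:
--         if isinstance(buffer[1], int) and 1 <= buffer[1] <= 10:
--             # Retourner un multiple de 3 s'il est précédé d'un nombre pair
--             if buffer[1] % 3 == 0 and buffer[0] % 2 == 0:
--                 yield buffer[1]
--             # Retourner un multiple de 4 s'il est suivi par un nombre impair
--             elif buffer[1] % 4 == 0 and isinstance(current, int) and current % 2 != 0:
--                 yield buffer[1]
--             # Retourner les entiers standards entre 1 et 10 qui ne sont ni multiples de 3 ni de 4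
--             elif buffer[1] % 3 != 0 and buffer[1] % 4 != 0:
--                 yield buffer[1]
--
--         # Avancer la fenêtre de 2 éléments
--         buffer[0], buffer[1] = buffer[1], current
-- ===== SOURCE B (Python) =====
-- def biz_generator(iterable):
--     # Eager indexed window over a materialized list instead of A's lazy
--     # iterator + 2-slot shifting buffer; same yielded values in order.
--     lst = list(iterable)
--     for i in range(2, len(lst) - 1):
--         x = lst[i]
--         if 1 <= x <= 10:
--             if x % 3 == 0:
--                 if lst[i - 1] % 2 == 0:
--                     yield x
--             elif x % 4 == 0:
--                 if lst[i + 1] % 2 != 0: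
--                     yield x
--             else:
--                 yield x
-- ===== Notes on version B (the rewrite author's own statement) =====
-- stated objective: simpler
-- what changed: Replaces the lazy iterator protocol with its try/except priming and a hand-shifted 2-slot buffer by a plain indexed loop over a materialized list, with the branch chain restructured into nested ifs (the 1..10 guard makes the %3 and %4 cases disjoint).
import Mathlib
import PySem

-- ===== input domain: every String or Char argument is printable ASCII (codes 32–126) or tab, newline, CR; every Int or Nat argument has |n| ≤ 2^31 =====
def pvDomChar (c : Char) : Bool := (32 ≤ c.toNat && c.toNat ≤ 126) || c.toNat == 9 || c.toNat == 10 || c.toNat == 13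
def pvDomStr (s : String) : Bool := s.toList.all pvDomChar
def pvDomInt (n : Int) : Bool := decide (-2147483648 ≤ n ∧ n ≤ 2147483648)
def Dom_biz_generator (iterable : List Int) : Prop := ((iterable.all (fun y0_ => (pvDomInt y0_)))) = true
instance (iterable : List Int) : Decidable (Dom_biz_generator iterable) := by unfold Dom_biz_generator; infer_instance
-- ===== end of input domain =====

-- B drops the iterator protocol and shifting 2-slot buffer for an indexed loop over a materialized list (simpler decomposition, same O(n) cost).

-- ===== PORT A =====
-- A's loop body: test buffer[1] with the flat elif chain, append, shift the buffer.
-- State is (buffer[0], buffer[1], yielded output so far).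
def pvStepA (st : Int × Int × List Int) (current : Int) : Int × Int × List Int :=
  let out :=
    if 1 ≤ st.2.1 ∧ st.2.1 ≤ 10 then
      if PySem.Int.mod st.2.1 3 = 0 ∧ PySem.Int.mod st.1 2 = 0 then st.2.2 ++ [st.2.1]
      else if PySem.Int.mod st.2.1 4 = 0 ∧ PySem.Int.mod current 2 ≠ 0 then st.2.2 ++ [st.2.1]
      else if PySem.Int.mod st.2.1 3 ≠ 0 ∧ PySem.Int.mod st.2.1 4 ≠ 0 then st.2.2 ++ [st.2.1]
      else st.2.2
    else st.2.2
  (st.2.1, current, out)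

-- A: skip one element, prime the buffer with the next two (StopIteration on
-- fewer than 3 elements → empty output), then fold pvStepA over the rest.
def biz_generator (iterable : List Int) : List Int :=
  match iterable with
  | _ :: b0 :: b1 :: rest => (rest.foldl pvStepA (b0, b1, ([] : List Int))).2.2
  | _ => []

-- ===== PORT B =====
-- B's loop body at index i: nested-if branch chain on lst[i] with neighbours
-- lst[i-1], lst[i+1] (indices always in range on B's loop; ported via pyGetD).
def pvStepB (lst : List Int) (out : List Int) (i : Int) : List Int :=
  let x := PySem.List.pyGetD lst i 0
  if 1 ≤ x ∧ x ≤ 10 then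
    if PySem.Int.mod x 3 = 0 then
      if PySem.Int.mod (PySem.List.pyGetD lst (i - 1) 0) 2 = 0 then out ++ [x] else out
    else if PySem.Int.mod x 4 = 0 then
      if PySem.Int.mod (PySem.List.pyGetD lst (i + 1) 0) 2 ≠ 0 then out ++ [x] else out
    else out ++ [x]
  else out

-- B: for i in range(2, len(lst) - 1): emit per pvStepB.
def biz_generator_alt (iterable : List Int) : List Int :=
  (PySem.List.pyRange 2 ((iterable.length : Int) - 1) 1).foldl (pvStepB iterable) []

-- ===== PRECONDITION & SPEC =====
def Spec_biz_generator (iterable : List Int) (out : List Int) : Prop := out = biz_generator_alt iterable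
instance (iterable : List Int) (out : List Int) : Decidable (Spec_biz_generator iterable out) := by unfold Spec_biz_generator; infer_instance

-- ===== CLAIM (what is proved, stated in full; the proofs are below) =====
def Claim_equal_biz_generator : Prop := ∀ (iterable : List Int), Dom_biz_generator iterable → Spec_biz_generator iterable (biz_generator iterable)

-- ===== LEMMAS AND PROOFS =====

-- What the middle element b emits given neighbours a, c (A's flat branch chain).
def pvEmit (a b c : Int) : List Int :=
  if 1 ≤ b ∧ b ≤ 10 then
    if PySem.Int.mod b 3 = 0 ∧ PySem.Int.mod a 2 = 0 then [b]
    else if PySem.Int.mod b 4 = 0 ∧ PySem.Int.mod c 2 ≠ 0 then [b]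
    else if PySem.Int.mod b 3 ≠ 0 ∧ PySem.Int.mod b 4 ≠ 0 then [b]
    else []
  else []

def pvWin (a b : Int) (rest : List Int) : List Int :=
  match rest with
  | [] => []
  | c :: rs => pvEmit a b c ++ pvWin b c rs

theorem pvStepA_eq (a b c : Int) (out : List Int) :
    pvStepA (a, b, out) c = (b, c, out ++ pvEmit a b c) := by
  unfold pvStepA pvEmit
  split_ifs <;> simp

-- B's nested branch chain emits the same singleton as A's flat chain
-- (inside the 1..10 guard, b cannot be a multiple of both 3 and 4).
theorem pvStepB_eq (lst : List Int) (out : List Int) (i : Int) :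
    pvStepB lst out i =
      out ++ pvEmit (PySem.List.pyGetD lst (i - 1) 0) (PySem.List.pyGetD lst i 0)
        (PySem.List.pyGetD lst (i + 1) 0) := by
  unfold pvStepB pvEmit
  set a := PySem.List.pyGetD lst (i - 1) 0
  set b := PySem.List.pyGetD lst i 0
  set c := PySem.List.pyGetD lst (i + 1) 0
  by_cases hb : 1 ≤ b ∧ b ≤ 10
  · rw [if_pos hb, if_pos hb]
    have h34 : ¬(PySem.Int.mod b 3 = 0 ∧ PySem.Int.mod b 4 = 0) := by
      rw [PySem.Int.mod_eq_zero_iff_dvd, PySem.Int.mod_eq_zero_iff_dvd]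
      rintro ⟨⟨k, hk⟩, ⟨l, hl⟩⟩; omega
    by_cases h3 : PySem.Int.mod b 3 = 0
    · rw [if_pos h3]
      by_cases ha : PySem.Int.mod a 2 = 0
      · rw [if_pos ha, if_pos (And.intro h3 ha)]
      · have h4 : ¬PySem.Int.mod b 4 = 0 := fun h4 => h34 ⟨h3, h4⟩
        rw [if_neg ha,
            if_neg (fun h : PySem.Int.mod b 3 = 0 ∧ PySem.Int.mod a 2 = 0 => ha h.2),
            if_neg (fun h : PySem.Int.mod b 4 = 0 ∧ PySem.Int.mod c 2 ≠ 0 => h4 h.1),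
            if_neg (fun h : PySem.Int.mod b 3 ≠ 0 ∧ PySem.Int.mod b 4 ≠ 0 => h.1 h3),
            List.append_nil]
    · rw [if_neg h3,
          if_neg (fun h : PySem.Int.mod b 3 = 0 ∧ PySem.Int.mod a 2 = 0 => h3 h.1)]
      by_cases h4 : PySem.Int.mod b 4 = 0
      · rw [if_pos h4]
        by_cases hc : PySem.Int.mod c 2 ≠ 0
        · rw [if_pos hc, if_pos (And.intro h4 hc)]
        · rw [if_neg hc,
              if_neg (fun h : PySem.Int.mod b 4 = 0 ∧ PySem.Int.mod c 2 ≠ 0 => hc h.2),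
              if_neg (fun h : PySem.Int.mod b 3 ≠ 0 ∧ PySem.Int.mod b 4 ≠ 0 => h.2 h4),
              List.append_nil]
      · rw [if_neg h4,
            if_neg (fun h : PySem.Int.mod b 4 = 0 ∧ PySem.Int.mod c 2 ≠ 0 => h4 h.1),
            if_pos (And.intro h3 h4)]
  · rw [if_neg hb, if_neg hb, List.append_nil]

-- A's fold accumulates pvWin.
theorem pvA_fold (rest : List Int) : ∀ (a b : Int) (out : List Int),
    (rest.foldl pvStepA (a, b, out)).2.2 = out ++ pvWin a b rest := by
  induction rest with
  | nil => intro a b out; simp [pvWin]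
  | cons c rs ih =>
    intro a b out
    rw [List.foldl_cons, pvStepA_eq, ih, pvWin, List.append_assoc]

-- B's indexed fold accumulates pvWin over the suffix from index k.
theorem pvB_fold (m : Nat) : ∀ (lst : List Int) (k : Nat), 1 ≤ k → lst.length = k + 1 + m →
    ∀ (out : List Int),
    (PySem.List.pyRange (k : Int) ((lst.length : Int) - 1) 1).foldl (pvStepB lst) out
      = out ++ pvWin (lst.getD (k - 1) 0) (lst.getD k 0) (lst.drop (k + 1)) := by
  induction m with
  | zero =>
    intro lst k hk hlen out
    rw [PySem.List.pyRange_one_eq_nil (by omega)]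
    rw [List.drop_eq_nil_of_le (by omega)]
    simp [pvWin]
  | succ m ih =>
    intro lst k hk hlen out
    have hlt : k + 1 < lst.length := by omega
    have hgd : lst.getD (k + 1) 0 = lst[k + 1] := List.getD_eq_getElem lst 0 hlt
    rw [PySem.List.pyRange_one_cons (by omega), List.foldl_cons, pvStepB_eq,
        show ((k : Int) - 1) = ((k - 1 : Nat) : Int) by omega,
        show ((k : Int) + 1) = ((k + 1 : Nat) : Int) by push_cast; ring,
        PySem.List.pyGetD_natCast, PySem.List.pyGetD_natCast, PySem.List.pyGetD_natCast,
        ih lst (k + 1) (by omega) (by omega),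
        List.drop_eq_getElem_cons hlt, pvWin, ← hgd,
        Nat.add_sub_cancel, List.append_assoc]

-- ===== VERDICT (by name: the statement is the Claim_ definition above) =====
theorem biz_generator_spec : Claim_equal_biz_generator := by
  intro iterable _
  unfold Spec_biz_generator biz_generator biz_generator_alt
  match iterable with
  | [] => simp [PySem.List.pyRange_one_eq_nil]
  | [x] => simp [PySem.List.pyRange_one_eq_nil]
  | [x, a] => simp [PySem.List.pyRange_one_eq_nil]
  | x :: a :: b :: rest =>
    simp only []
    rw [pvA_fold]
    have hB := pvB_fold rest.length (x :: a :: b :: rest) 2 (by omega)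
      (by simp only [List.length_cons]; omega) []
    simp only [Nat.cast_ofNat] at hB
    rw [hB]
    simp
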